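-- pv_equiv track=rewrite | github.com/vaibhav-jain-dev/learning-algo | problems/200-must-solve/arrays/05-non-constructible-change/similar/03-all-non-constructible/python_code.py | all_non_constructible
-- ===== SOURCE A (Python) =====
-- from typing import List, Tuple
--
-- def all_non_constructible(coins: List[int], limit: int) -> List[int]:
--     """Find all values <= limit that can't be made."""
--     sorted_coins = sorted(coins)
--
--     non_constructible = []
--     reachable = 0
--     i = 0
--
--     for target in range(1, limit + 1):
--         # Add all coins <= reachable+1
--         while i < len(sorted_coins) and sorted_coins[i] <= reachable + 1:
--             reachable += sorted_coins[i]
--             i += 1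
--
--         # Check if target is constructible
--         if target > reachable:
--             non_constructible.append(target)
--
--     return non_constructible
-- ===== SOURCE B (Python) =====
-- def all_non_constructible(coins, limit):
--     """Find all values <= limit that can't be made."""
--     reachable = 0
--     for coin in sorted(coins):
--         if coin <= reachable + 1:
--             reachable += coin
--         else:
--             break
--     return list(range(max(reachable, 0) + 1, limit + 1))
-- ===== Notes on version B (the rewrite author's own statement) =====
-- stated objective: alternative
-- what changed: A runs the greedy coin absorption inside a per-target loop over range(1, limit+1) and appends each non-constructible target; B computes the greedy reachable fixpoint once over the sorted coins and returns range(max(reachable,0)+1, limit+1) directly.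
import Mathlib
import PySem

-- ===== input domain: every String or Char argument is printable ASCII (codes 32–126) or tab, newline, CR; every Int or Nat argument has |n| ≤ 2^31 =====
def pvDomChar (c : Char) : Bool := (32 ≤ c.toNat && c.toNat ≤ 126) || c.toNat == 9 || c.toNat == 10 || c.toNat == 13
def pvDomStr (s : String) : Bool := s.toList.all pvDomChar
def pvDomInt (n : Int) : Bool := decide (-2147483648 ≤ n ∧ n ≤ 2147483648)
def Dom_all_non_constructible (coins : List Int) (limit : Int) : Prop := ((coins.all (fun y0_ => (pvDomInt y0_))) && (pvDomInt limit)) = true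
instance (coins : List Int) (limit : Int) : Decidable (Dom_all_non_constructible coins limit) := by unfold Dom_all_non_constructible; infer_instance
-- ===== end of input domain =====

-- B computes the greedy reachable fixpoint once over the sorted coins and returns
-- the range (reachable+1 .. limit) directly instead of testing every target in 1..limit.


-- ===== PORT A =====
-- the inner 'while i < len(sorted_coins) and sorted_coins[i] <= reachable + 1' loop
def ancWhile (sc : List Int) (reachable : Int) (i : Nat) : Int × Nat :=
  if h : i < sc.length then
    if sc[i] ≤ reachable + 1 then ancWhile sc (reachable + sc[i]) (i + 1) else (reachable, i)
  else (reachable, i)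
termination_by sc.length - i

def all_non_constructible (coins : List Int) (limit : Int) : List Int :=
  let sorted_coins := PySem.List.sorted coins (fun x => x) false
  let st := (PySem.List.pyRange 1 (limit + 1) 1).foldl
    (fun (st : List Int × Int × Nat) target =>
      let ri := ancWhile sorted_coins st.2.1 st.2.2
      let acc := if target > ri.1 then st.1 ++ [target] else st.1
      (acc, ri.1, ri.2))
    ([], 0, 0)
  st.1

-- ===== PORT B =====
-- 'for coin in sorted(coins): if coin <= reachable+1: reachable += coin else: break'
def ancGreedy (sc : List Int) (reachable : Int) : Int :=
  match sc with
  | [] => reachable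
  | c :: t => if c ≤ reachable + 1 then ancGreedy t (reachable + c) else reachable

def all_non_constructible_alt (coins : List Int) (limit : Int) : List Int :=
  PySem.List.pyRange (max (ancGreedy (PySem.List.sorted coins (fun x => x) false) 0) 0 + 1) (limit + 1) 1

-- ===== PRECONDITION & SPEC =====
def Spec_all_non_constructible (coins : List Int) (limit : Int) (out : List Int) : Prop := out = all_non_constructible_alt coins limit
instance (coins : List Int) (limit : Int) (out : List Int) : Decidable (Spec_all_non_constructible coins limit out) := by unfold Spec_all_non_constructible; infer_instance

-- ===== CLAIM (what is proved, stated in full; the proofs are below) =====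
def Claim_equal_all_non_constructible : Prop := ∀ (coins : List Int) (limit : Int), Dom_all_non_constructible coins limit → Spec_all_non_constructible coins limit (all_non_constructible coins limit)

-- ===== LEMMAS AND PROOFS =====

-- the while loop's result is a fixpoint: running it again changes nothing
theorem ancWhile_fix (sc : List Int) (r : Int) (i : Nat) :
    ancWhile sc (ancWhile sc r i).1 (ancWhile sc r i).2 = ancWhile sc r i := by
  fun_induction ancWhile sc r i with
  | case1 r i h hle ih => exact ih
  | case2 r i h hle => simp [ancWhile, h, hle]
  | case3 r i h => simp [ancWhile, h]

-- the while loop computes the same value as B's greedy fold on the dropped list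
theorem ancWhile_eq_greedy (sc : List Int) (r : Int) (i : Nat) :
    (ancWhile sc r i).1 = ancGreedy (sc.drop i) r := by
  fun_induction ancWhile sc r i with
  | case1 r i h hle ih =>
    rw [ih, List.drop_eq_getElem_cons h]
    simp [ancGreedy, hle]
  | case2 r i h hle =>
    rw [List.drop_eq_getElem_cons h]
    simp [ancGreedy, hle]
  | case3 r i h =>
    rw [List.drop_of_length_le (by omega)]
    simp [ancGreedy]

-- once the state is a fixpoint, A's target fold just filters the targets by '> r'
theorem anc_fold_fix (ts : List Int) (sc : List Int) (acc : List Int) (r : Int) (i : Nat)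
    (hfix : ancWhile sc r i = (r, i)) :
    ts.foldl
      (fun (st : List Int × Int × Nat) target =>
        let ri := ancWhile sc st.2.1 st.2.2
        let acc := if target > ri.1 then st.1 ++ [target] else st.1
        (acc, ri.1, ri.2))
      (acc, r, i)
      = (acc ++ ts.filter (fun t => decide (r < t)), r, i) := by
  induction ts generalizing acc with
  | nil => simp
  | cons t ts ih =>
    simp only [List.foldl_cons, hfix, List.filter_cons]
    by_cases h : r < t
    · simp only [gt_iff_lt, if_pos h, ih]
      simp [h]
    · simp only [gt_iff_lt, if_neg h, ih]
      simp [h]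
  
-- filtering 1..limit by '> r' gives the range max(r,0)+1 .. limit
theorem filter_pyRange_gt (r limit : Int) :
    (PySem.List.pyRange 1 (limit + 1) 1).filter (fun t => decide (r < t))
      = PySem.List.pyRange (max r 0 + 1) (limit + 1) 1 := by
  by_cases hr : max r 0 + 1 ≤ limit + 1
  · rw [PySem.List.pyRange_one_append 1 (max r 0 + 1) (limit + 1) (by omega) hr,
        List.filter_append]
    have h1 : (PySem.List.pyRange 1 (max r 0 + 1) 1).filter (fun t => decide (r < t)) = [] := by
      rw [List.filter_eq_nil_iff]
      intro x hx
      rw [PySem.List.mem_pyRange_one] at hx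
      simp only [decide_eq_true_eq]
      omega
    have h2 : (PySem.List.pyRange (max r 0 + 1) (limit + 1) 1).filter (fun t => decide (r < t))
        = PySem.List.pyRange (max r 0 + 1) (limit + 1) 1 := by
      rw [List.filter_eq_self]
      intro x hx
      rw [PySem.List.mem_pyRange_one] at hx
      simp only [decide_eq_true_eq]
      omega
    rw [h1, h2, List.nil_append]
  · push Not at hr
    rw [PySem.List.pyRange_one_eq_nil (le_of_lt hr), List.filter_eq_nil_iff]
    intro x hx
    rw [PySem.List.mem_pyRange_one] at hx
    simp only [decide_eq_true_eq]
    omega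

-- ===== VERDICT (by name: the statement is the Claim_ definition above) =====
theorem all_non_constructible_spec : Claim_equal_all_non_constructible := by
  intro coins limit _
  simp only [Spec_all_non_constructible, all_non_constructible, all_non_constructible_alt]
  set sc := PySem.List.sorted coins (fun x => x) false with hsc
  by_cases hl : limit + 1 ≤ 1
  · rw [PySem.List.pyRange_one_eq_nil hl, PySem.List.pyRange_one_eq_nil (by omega)]
    simp
  · push Not at hl
    obtain ⟨r, i, hri⟩ : ∃ r i, ancWhile sc 0 0 = (r, i) := ⟨_, _, rfl⟩
    have hfix : ancWhile sc r i = (r, i) := by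
      have := ancWhile_fix sc 0 0
      rw [hri] at this
      exact this
    have hval : r = ancGreedy sc 0 := by
      have := ancWhile_eq_greedy sc 0 0
      rw [hri] at this
      simpa using this
    rw [PySem.List.pyRange_one_cons (by omega : (1:Int) < limit + 1)]
    simp only [List.foldl_cons, hri, List.nil_append, gt_iff_lt]
    rw [anc_fold_fix _ _ _ _ _ hfix]
    have hsplit : ((if r < 1 then [(1:Int)] else []) ++
          (PySem.List.pyRange (1+1) (limit + 1) 1).filter (fun t => decide (r < t)))
        = (PySem.List.pyRange 1 (limit + 1) 1).filter (fun t => decide (r < t)) := by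
      rw [PySem.List.pyRange_one_cons (by omega : (1:Int) < limit + 1), List.filter_cons]
      by_cases h : r < 1
      · simp [h]
      · simp [h]
    rw [hsplit, ← hval, filter_pyRange_gt]
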